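-- pv_equiv track=rewrite | github.com/quadrismegistus/cadence | cadence/constraints/constraints.py | bad_window
-- ===== SOURCE A (Python) =====
-- def bad_window(s,badwindow=(1,1)):
--     wlen=len(badwindow)
--     l=[]
--     window=[]
--     for x in s:
--         window.append(x)
--         l.append(int(tuple(window)==badwindow))
--         if len(window)>=wlen:window.pop(0)
--     return l
-- ===== SOURCE B (Python) =====
-- def bad_window(s, badwindow=(1, 1)):
--     # KMP scan: build the failure table of the pattern in one pass, then mark
--     # each position of s where a full match of the pattern ends in one pass.
--     pat = list(badwindow)
--     m = len(pat)
--     n = len(s)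
--     out = [0] * n
--     if m == 0 or n < m:
--         return out
--     fail = [0, 0]
--     j = 0
--     for x in pat[1:]:
--         while j > 0 and pat[j] != x:
--             j = fail[j]
--         if pat[j] == x:
--             j += 1
--         fail.append(j)
--     j = 0
--     for i, x in enumerate(s):
--         while j > 0 and pat[j] != x:
--             j = fail[j]
--         if pat[j] == x:
--             j += 1
--         if j == m:
--             out[i] = 1
--             j = fail[m]
--     return out
-- ===== Notes on version B (the rewrite author's own statement) =====
-- stated objective: faster
-- what changed: Replaces A's per-element window maintenance (tuple(window) rebuild and full comparison at every position) by a KMP scan: a linear-time failure table for the pattern plus a single pass over s keeping only a match-length state and marking positions where a full match ends.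
import Mathlib
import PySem

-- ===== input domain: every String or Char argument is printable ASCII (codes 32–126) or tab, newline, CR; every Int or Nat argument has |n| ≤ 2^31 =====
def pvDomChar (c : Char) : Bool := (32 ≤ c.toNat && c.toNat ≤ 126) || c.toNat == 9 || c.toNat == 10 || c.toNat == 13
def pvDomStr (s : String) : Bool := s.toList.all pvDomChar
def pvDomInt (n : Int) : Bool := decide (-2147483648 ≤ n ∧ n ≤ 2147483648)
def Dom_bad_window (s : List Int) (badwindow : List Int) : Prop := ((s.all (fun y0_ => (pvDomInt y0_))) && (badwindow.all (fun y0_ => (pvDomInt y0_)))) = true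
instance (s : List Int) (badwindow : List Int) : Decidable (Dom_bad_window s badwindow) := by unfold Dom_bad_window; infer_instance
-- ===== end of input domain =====

-- B replaces A's per-element window copy-and-compare by a KMP scan (failure table + one-pass match marking).

-- ===== PORT A =====
-- loop body of A: append x to the window, emit int(tuple(window)==badwindow), pop the head once the window is full
def stepA (badwindow : List Int) (st : List Int × List Int) (x : Int) : List Int × List Int :=
  let window := st.1 ++ [x]
  let l := st.2 ++ [if window = badwindow then (1 : Int) else 0]
  (if badwindow.length ≤ window.length then window.drop 1 else window, l)

def bad_window (s : List Int) (badwindow : List Int) : List Int :=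
  (s.foldl (stepA badwindow) ([], [])).2

-- ===== PORT B =====
-- the `while j > 0 and pat[j] != x: j = fail[j]` loop; fuel = initial j suffices since fail[j] < j
def kmpWhile (pat : List Int) (fail : List Nat) (x : Int) : Nat → Nat → Nat
  | 0, j => j
  | fuel + 1, j =>
      if j ≠ 0 ∧ pat.getD j 0 ≠ x then kmpWhile pat fail x fuel (fail.getD j 0) else j

-- loop body of the failure-table construction: advance the border state, append it as the next entry
def stepF (pat : List Int) (st : List Nat × Nat) (x : Int) : List Nat × Nat :=
  let j := kmpWhile pat st.1 x st.2 st.2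
  let j := if pat.getD j 0 = x then j + 1 else j
  (st.1 ++ [j], j)

-- `fail = [0,0]; j = 0; for x in pat[1:]: …; fail.append(j)`
def buildFail (pat : List Int) : List Nat × Nat :=
  (pat.drop 1).foldl (stepF pat) ([0, 0], 0)

-- loop body of B's scan: advance the KMP state, emit 1 exactly at a full match (then restart from fail[m])
def stepB (pat : List Int) (fail : List Nat) (st : Nat × List Int) (x : Int) : Nat × List Int :=
  let j := kmpWhile pat fail x st.1 st.1
  let j := if pat.getD j 0 = x then j + 1 else j
  if j = pat.length then (fail.getD pat.length 0, st.2 ++ [1]) else (j, st.2 ++ [0])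

def bad_window_alt (s : List Int) (badwindow : List Int) : List Int :=
  let pat := badwindow
  let m := pat.length
  if m = 0 ∨ s.length < m then List.replicate s.length 0
  else
    let fail := (buildFail pat).1
    (s.foldl (stepB pat fail) (0, [])).2

-- ===== PRECONDITION & SPEC =====
def Spec_bad_window (s : List Int) (badwindow : List Int) (out : List Int) : Prop := out = bad_window_alt s badwindow
instance (s : List Int) (badwindow : List Int) (out : List Int) : Decidable (Spec_bad_window s badwindow out) := by unfold Spec_bad_window; infer_instance

-- ===== CLAIM (what is proved, stated in full; the proofs are below) =====
def Claim_equal_bad_window : Prop := ∀ (s : List Int) (badwindow : List Int), Dom_bad_window s badwindow → Spec_bad_window s badwindow (bad_window s badwindow)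

-- ===== LEMMAS AND PROOFS =====

-- the common specification: bit i is 1 iff the pattern is a suffix of the first i+1 elements
def indAux (pat : List Int) : List Int → List Int → List Int
  | _, [] => []
  | t, x :: r => (if pat <:+ (t ++ [x]) then (1 : Int) else 0) :: indAux pat (t ++ [x]) r

-- fail entry f is the longest proper border of pat.take q
def FailSpec (pat : List Int) (q f : Nat) : Prop :=
  f < q ∧ pat.take f <:+ pat.take q ∧ ∀ p, p < q → pat.take p <:+ pat.take q → p ≤ f

-- invariant of both KMP loops: j is the longest k < |pat| with pat.take k a suffix of the processed prefix
def Jinv (pat t : List Int) (j : Nat) : Prop :=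
  j < pat.length ∧ pat.take j <:+ t ∧ ∀ k, k < pat.length → pat.take k <:+ t → k ≤ j

lemma suffix_nested {u v t : List Int} (hu : u <:+ t) (hv : v <:+ t) (h : u.length ≤ v.length) :
    u <:+ v := by
  have := List.prefix_of_prefix_length_le (List.reverse_prefix.mpr hu)
    (List.reverse_prefix.mpr hv) (by simpa using h)
  exact List.reverse_prefix.mp this

lemma snoc_suffix_snoc {u t : List Int} {a x : Int} :
    (u ++ [a]) <:+ (t ++ [x]) ↔ u <:+ t ∧ a = x := by
  constructor
  · rintro ⟨c, hc⟩
    rw [← List.append_assoc, ← List.concat_eq_append, ← List.concat_eq_append] at hc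
    have h2 := List.concat_inj.mp hc
    exact ⟨⟨c, h2.1⟩, h2.2⟩
  · rintro ⟨⟨c, hc⟩, rfl⟩
    exact ⟨c, by rw [← List.append_assoc, hc]⟩

lemma take_snoc (pat : List Int) {k : Nat} (h : k < pat.length) :
    pat.take (k + 1) = pat.take k ++ [pat.getD k 0] := by
  rw [List.take_add_one, List.getElem?_eq_getElem h, List.getD_eq_getElem _ _ h]
  rfl

lemma take_suffix_snoc (pat t : List Int) (x : Int) {k : Nat} (hk1 : 1 ≤ k) (hk : k ≤ pat.length) :
    pat.take k <:+ t ++ [x] ↔ (pat.take (k - 1) <:+ t ∧ pat.getD (k - 1) 0 = x) := by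
  have hlt : k - 1 < pat.length := by omega
  have : pat.take k = pat.take (k - 1) ++ [pat.getD (k - 1) 0] := by
    have := take_snoc pat hlt
    rw [show k - 1 + 1 = k by omega] at this
    exact this
  rw [this, snoc_suffix_snoc]

-- a proper suffix of pat.take k is exactly a suffix of its tail
lemma proper_suffix_tail (pat : List Int) {q k : Nat} (hq : q < k) (hk : k ≤ pat.length) :
    pat.take q <:+ pat.take k ↔ pat.take q <:+ (pat.take k).drop 1 := by
  constructor
  · intro h
    have hlq : (pat.take q).length = q := by rw [List.length_take]; omega
    have hlk : (pat.take k).length = k := by rw [List.length_take]; omega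
    have := List.suffix_iff_eq_drop.mp h
    rw [hlq, hlk] at this
    rw [this, show k - q = 1 + (k - q - 1) by omega, ← List.drop_drop]
    exact List.drop_suffix _ _
  · intro h
    exact h.trans (List.drop_suffix _ _)

lemma FailSpec_iff_Jinv (pat : List Int) {k j : Nat} (hk1 : 1 ≤ k) (hk : k ≤ pat.length) :
    FailSpec pat k j ↔ Jinv pat ((pat.take k).drop 1) j := by
  have hlk : (pat.take k).length = k := by rw [List.length_take]; omega
  constructor
  · rintro ⟨hjk, hjs, hjmax⟩
    refine ⟨by omega, (proper_suffix_tail pat hjk hk).mp hjs, ?_⟩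
    intro p hp hps
    have hpk : p < k := by
      have := hps.length_le
      rw [List.length_drop, hlk, List.length_take] at this
      omega
    exact hjmax p hpk ((proper_suffix_tail pat hpk hk).mpr hps)
  · rintro ⟨hjm, hjs, hjmax⟩
    have hjk : j < k := by
      have := hjs.length_le
      rw [List.length_drop, hlk, List.length_take] at this
      omega
    refine ⟨hjk, (proper_suffix_tail pat hjk hk).mpr hjs, ?_⟩
    intro p hp hps
    exact hjmax p (by omega) ((proper_suffix_tail pat hp hk).mp hps)

-- ---- while-loop correctness ----

lemma kmpWhile_spec (pat : List Int) (fail : List Nat) (x : Int) (t : List Int) :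
    ∀ (fuel j : Nat), j ≤ fuel → j < pat.length → pat.take j <:+ t →
      (∀ q, 1 ≤ q → q ≤ j → FailSpec pat q (fail.getD q 0)) →
      (∀ k, k < pat.length → pat.take k <:+ t → pat.getD k 0 = x → k ≤ j) →
      (kmpWhile pat fail x fuel j) < pat.length ∧
        pat.take (kmpWhile pat fail x fuel j) <:+ t ∧
        ((kmpWhile pat fail x fuel j) = 0 ∨ pat.getD (kmpWhile pat fail x fuel j) 0 = x) ∧
        (∀ k, k < pat.length → pat.take k <:+ t → pat.getD k 0 = x →
          k ≤ kmpWhile pat fail x fuel j) := by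
  intro fuel
  induction fuel with
  | zero =>
    intro j hj hjm hsuf _ hmax
    interval_cases j
    exact ⟨hjm, hsuf, Or.inl rfl, hmax⟩
  | succ fuel ih =>
    intro j hj hjm hsuf hfail hmax
    rw [kmpWhile]
    split_ifs with hc
    · obtain ⟨hj0, hjx⟩ := hc
      obtain ⟨F1, F2, F3⟩ := hfail j (by omega) le_rfl
      refine ih (fail.getD j 0) (by omega) (by omega)
        (((proper_suffix_tail pat F1 (by omega)).mp F2).trans ((List.drop_suffix _ _).trans hsuf))
        (fun q hq1 hq2 => hfail q hq1 (by omega)) ?_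
      · intro k hk hks hkx
        have hkj : k ≤ j := hmax k hk hks hkx
        have hkj' : k < j := by
          rcases Nat.lt_or_ge k j with h | h
          · exact h
          · exfalso; exact hjx (by rw [show j = k by omega] at hjx ⊢; exact hkx)
        have hnest : pat.take k <:+ pat.take j :=
          suffix_nested hks hsuf (by rw [List.length_take, List.length_take]; omega)
        exact F3 k hkj' hnest
    · push_neg at hc
      rcases Nat.eq_zero_or_pos j with h0 | h0
      · exact ⟨hjm, hsuf, Or.inl h0, hmax⟩
      · exact ⟨hjm, hsuf, Or.inr (hc (by omega)), hmax⟩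

-- ---- one KMP advance (while loop + conditional increment), shared by table construction and scan ----

lemma advance_core (pat : List Int) (fail : List Nat) (x : Int) (t : List Int) (j : Nat)
    (hfail : ∀ q, 1 ≤ q → q ≤ j → FailSpec pat q (fail.getD q 0))
    (hinv : Jinv pat t j) :
    ((if pat.getD (kmpWhile pat fail x j j) 0 = x
        then kmpWhile pat fail x j j + 1 else kmpWhile pat fail x j j) = pat.length
      ↔ pat <:+ t ++ [x]) ∧
    (∀ j2, j2 = (if pat.getD (kmpWhile pat fail x j j) 0 = x
        then kmpWhile pat fail x j j + 1 else kmpWhile pat fail x j j) →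
      j2 ≠ pat.length → Jinv pat (t ++ [x]) j2) := by
  obtain ⟨hjm, hsuf, hmaxfull⟩ := hinv
  have hm : 1 ≤ pat.length := by omega
  have W := kmpWhile_spec pat fail x t j j le_rfl hjm hsuf hfail
    (fun k hk hks _ => hmaxfull k hk hks)
  set r := kmpWhile pat fail x j j with hr
  obtain ⟨hrm, hrsuf, hrstop, hrmax⟩ := W
  have hC1 : (if pat.getD r 0 = x then r + 1 else r) = pat.length ↔ pat <:+ t ++ [x] := by
    constructor
    · intro h2
      split_ifs at h2 with hx
      · have : pat.take pat.length <:+ t ++ [x] := by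
          rw [take_suffix_snoc pat t x hm le_rfl]
          constructor
          · rw [show pat.length - 1 = r by omega]; exact hrsuf
          · rw [show pat.length - 1 = r by omega]; exact hx
        rwa [List.take_length] at this
      · omega
    · intro hsfx
      have h' : pat.take pat.length <:+ t ++ [x] := by rwa [List.take_length]
      rw [take_suffix_snoc pat t x hm le_rfl] at h'
      have hle : pat.length - 1 ≤ r := hrmax _ (by omega) h'.1 h'.2
      have hreq : r = pat.length - 1 := by omega
      rw [hreq, if_pos h'.2]
      omega
  refine ⟨hC1, ?_⟩
  rintro j2 rfl hne
  split_ifs with hx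
  · have hj2m : r + 1 < pat.length := by
      have : (if pat.getD r 0 = x then r + 1 else r) = r + 1 := if_pos hx
      rw [this] at hne
      omega
    refine ⟨hj2m, ?_, ?_⟩
    · rw [take_suffix_snoc pat t x (by omega) (by omega)]
      simp only [Nat.add_sub_cancel]
      exact ⟨hrsuf, hx⟩
    · intro k hk hks
      rcases Nat.eq_zero_or_pos k with h0 | h0
      · omega
      · rw [take_suffix_snoc pat t x h0 (by omega)] at hks
        have := hrmax (k - 1) (by omega) hks.1 hks.2
        omega
  · have hr0 : r = 0 := by
      rcases hrstop with h | h
      · exact h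
      · exact absurd h hx
    refine ⟨by omega, by rw [hr0]; simp only [List.take_zero]; exact List.nil_suffix, ?_⟩
    intro k hk hks
    rcases Nat.eq_zero_or_pos k with h0 | h0
    · omega
    · rw [take_suffix_snoc pat t x h0 (by omega)] at hks
      have hk1 := hrmax (k - 1) (by omega) hks.1 hks.2
      rw [hr0] at hk1
      exfalso
      apply hx
      rw [hr0, ← show k - 1 = 0 by omega]
      exact hks.2

-- restarting from fail[m] after a full match restores the invariant
lemma match_reset (pat : List Int) {t : List Int} {x : Int} {fm : Nat}
    (hm : pat ≠ []) (hps : pat <:+ t ++ [x]) (hfm : FailSpec pat pat.length fm) :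
    Jinv pat (t ++ [x]) fm := by
  have hm1 : 1 ≤ pat.length := List.length_pos_iff.mpr hm
  obtain ⟨F1, F2, F3⟩ := hfm
  refine ⟨F1, ?_, ?_⟩
  · have := F2
    rw [List.take_length] at this
    exact this.trans hps
  · intro k hk hks
    have hnest : pat.take k <:+ pat.take pat.length := by
      rw [List.take_length]
      exact suffix_nested hks hps (by rw [List.length_take]; omega)
    exact F3 k hk hnest

-- ---- failure-table construction ----

lemma getD_append_lt {fl : List Nat} {a : Nat} {q : Nat} (h : q < fl.length) :
    (fl ++ [a]).getD q 0 = fl.getD q 0 := by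
  rw [List.getD_eq_getElem?_getD, List.getD_eq_getElem?_getD, List.getElem?_append_left h]

lemma getD_append_last {fl : List Nat} {a : Nat} :
    (fl ++ [a]).getD fl.length 0 = a := by
  rw [List.getD_eq_getElem?_getD, List.getElem?_append_right le_rfl]
  simp

lemma buildFail_inv (pat : List Int) :
    ∀ (fuel k : Nat) (fl : List Nat), pat.length - k = fuel → 1 ≤ k → k ≤ pat.length →
      fl.length = k + 1 →
      (∀ q, 1 ≤ q → q ≤ k → FailSpec pat q (fl.getD q 0)) →
      (((pat.drop k).foldl (stepF pat) (fl, fl.getD k 0)).1.length = pat.length + 1) ∧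
      (∀ q, 1 ≤ q → q ≤ pat.length →
        FailSpec pat q
          (((pat.drop k).foldl (stepF pat) (fl, fl.getD k 0)).1.getD q 0)) := by
  intro fuel
  induction fuel with
  | zero =>
    intro k fl hfuel hk1 hk hlen hfl
    have hkm : k = pat.length := by omega
    subst hkm
    rw [List.drop_length]
    exact ⟨by simpa using hlen, fun q hq1 hq2 => hfl q hq1 hq2⟩
  | succ fuel ih =>
    intro k fl hfuel hk1 hk hlen hfl
    have hkm : k < pat.length := by omega
    have hdk : pat.drop k = pat.getD k 0 :: pat.drop (k + 1) := by
      rw [List.getD_eq_getElem _ _ hkm, List.drop_eq_getElem_cons hkm]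
    set x := pat.getD k 0 with hxdef
    -- current state j = fl.getD k 0 is the border of pat.take k
    have hjinv : Jinv pat ((pat.take k).drop 1) (fl.getD k 0) :=
      (FailSpec_iff_Jinv pat hk1 (by omega)).mp (hfl k hk1 le_rfl)
    have hadv := advance_core pat fl x ((pat.take k).drop 1) (fl.getD k 0)
      (fun q hq1 hq2 => hfl q hq1 (by
        have := (hfl k hk1 le_rfl).1
        omega)) hjinv
    set j2 := (if pat.getD (kmpWhile pat fl x (fl.getD k 0) (fl.getD k 0)) 0 = x
        then kmpWhile pat fl x (fl.getD k 0) (fl.getD k 0) + 1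
        else kmpWhile pat fl x (fl.getD k 0) (fl.getD k 0)) with hj2
    -- the processed text extends to the tail of pat.take (k+1)
    have htk : (pat.take k).drop 1 ++ [x] = (pat.take (k + 1)).drop 1 := by
      rw [take_snoc pat hkm, List.drop_append_of_le_length (by rw [List.length_take]; omega)]
    -- a full match is impossible while building the table (the text is shorter than pat)
    have hne : j2 ≠ pat.length := by
      intro hfull
      have hps := hadv.1.mp hfull
      have := hps.length_le
      rw [List.length_append, List.length_drop, List.length_take, List.length_cons,
        List.length_nil] at this
      omega
    have hinv2 : Jinv pat ((pat.take (k + 1)).drop 1) j2 := by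
      rw [← htk]
      exact hadv.2 j2 hj2 hne
    have hfs2 : FailSpec pat (k + 1) j2 :=
      (FailSpec_iff_Jinv pat (by omega) (by omega)).mpr hinv2
    -- one fold step
    rw [hdk, List.foldl_cons]
    have hstep : stepF pat (fl, fl.getD k 0) x = (fl ++ [j2], j2) := by
      rw [stepF, hj2]
    rw [hstep]
    have hlast : (fl ++ [j2]).getD (k + 1) 0 = j2 := by
      rw [← hlen]; exact getD_append_last
    have hfl2 : ∀ q, 1 ≤ q → q ≤ k + 1 → FailSpec pat q ((fl ++ [j2]).getD q 0) := by
      intro q hq1 hq2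
      rcases Nat.lt_or_ge q (k + 1) with h | h
      · rw [getD_append_lt (by omega)]
        exact hfl q hq1 (by omega)
      · have : q = k + 1 := by omega
        subst this
        rw [hlast]
        exact hfs2
    have := ih (k + 1) (fl ++ [j2]) (by omega) (by omega) (by omega)
      (by rw [List.length_append, hlen]; rfl) hfl2
    rw [hlast] at this
    exact this

lemma buildFail_spec (pat : List Int) (hm : pat ≠ []) :
    (buildFail pat).1.length = pat.length + 1 ∧
      ∀ q, 1 ≤ q → q ≤ pat.length → FailSpec pat q ((buildFail pat).1.getD q 0) := by
  have hm1 : 1 ≤ pat.length := List.length_pos_iff.mpr hm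
  have hfl1 : ∀ q, 1 ≤ q → q ≤ 1 → FailSpec pat q (([0, 0] : List Nat).getD q 0) := by
    intro q hq1 hq2
    have hq : q = 1 := by omega
    subst hq
    have h0 : (([0, 0] : List Nat).getD 1 0) = 0 := rfl
    rw [h0]
    refine ⟨by omega, by simp only [List.take_zero]; exact List.nil_suffix, ?_⟩
    intro p hp _
    omega
  have h := buildFail_inv pat (pat.length - 1) 1 [0, 0] rfl le_rfl hm1 rfl hfl1
  rw [buildFail]
  have h0 : ([0, 0] : List Nat).getD 1 0 = 0 := rfl
  rw [h0] at h
  exact h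

-- ---- B's scan ----

lemma stepB_inv (pat : List Int) (fail : List Nat) (t : List Int) (x : Int) (j : Nat)
    (acc : List Int) (hm : pat ≠ [])
    (hfail : ∀ q, 1 ≤ q → q ≤ pat.length → FailSpec pat q (fail.getD q 0))
    (h : Jinv pat t j) :
    ∃ j3, stepB pat fail (j, acc) x
        = (j3, acc ++ [if pat <:+ (t ++ [x]) then (1 : Int) else 0]) ∧ Jinv pat (t ++ [x]) j3 := by
  have hjm := h.1
  have hadv := advance_core pat fail x t j (fun q hq1 hq2 => hfail q hq1 (by omega)) h
  set j2 := (if pat.getD (kmpWhile pat fail x j j) 0 = x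
      then kmpWhile pat fail x j j + 1 else kmpWhile pat fail x j j) with hj2
  have hstep : stepB pat fail (j, acc) x
      = if j2 = pat.length then (fail.getD pat.length 0, acc ++ [1]) else (j2, acc ++ [0]) := by
    rw [stepB]
  by_cases hfull : j2 = pat.length
  · refine ⟨fail.getD pat.length 0, ?_, ?_⟩
    · rw [hstep, if_pos hfull, if_pos (hadv.1.mp hfull)]
    · exact match_reset pat hm (hadv.1.mp hfull) (hfail pat.length (by omega) le_rfl)
  · refine ⟨j2, ?_, ?_⟩
    · rw [hstep, if_neg hfull, if_neg (fun hh => hfull (hadv.1.mpr hh))]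
    · exact hadv.2 j2 hj2 hfull

lemma B_fold (pat : List Int) (fail : List Nat) (hm : pat ≠ [])
    (hfail : ∀ q, 1 ≤ q → q ≤ pat.length → FailSpec pat q (fail.getD q 0)) :
    ∀ (rest t acc : List Int) (j : Nat), Jinv pat t j →
      (rest.foldl (stepB pat fail) (j, acc)).2 = acc ++ indAux pat t rest := by
  intro rest
  induction rest with
  | nil => intro t acc j _; simp [indAux]
  | cons x r ih =>
    intro t acc j hinv
    obtain ⟨j3, hstep, hinv3⟩ := stepB_inv pat fail t x j acc hm hfail hinv
    rw [List.foldl_cons, hstep, ih (t ++ [x]) _ j3 hinv3, indAux]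
    simp

-- ---- A-side characterisation ----

lemma window_eq_iff (pat t : List Int) (x : Int) (hm : pat ≠ []) :
    (t.drop (t.length - (pat.length - 1)) ++ [x] = pat) ↔ pat <:+ (t ++ [x]) := by
  have hm1 : 1 ≤ pat.length := List.length_pos_iff.mpr hm
  set d := t.length - (pat.length - 1) with hd
  have hw : t.drop d <:+ t := List.drop_suffix _ _
  have hwx : t.drop d ++ [x] <:+ t ++ [x] := by
    obtain ⟨c, hc⟩ := hw
    exact ⟨c, by rw [← List.append_assoc, hc]⟩
  constructor
  · intro h; rw [← h]; exact hwx
  · intro h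
    have hlen : pat.length ≤ t.length + 1 := by
      have := h.length_le
      simpa using this
    have hlenw : (t.drop d ++ [x]).length = pat.length := by
      simp [List.length_drop]
      omega
    have h1 := List.suffix_iff_eq_drop.mp hwx
    have h2 := List.suffix_iff_eq_drop.mp h
    rw [hlenw] at h1
    rw [h2]
    exact h1

lemma stateA_eq (pat t : List Int) (x : Int) (hm : pat ≠ []) :
    (if pat.length ≤ (t.drop (t.length - (pat.length - 1)) ++ [x]).length
      then (t.drop (t.length - (pat.length - 1)) ++ [x]).drop 1
      else t.drop (t.length - (pat.length - 1)) ++ [x])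
    = (t ++ [x]).drop ((t ++ [x]).length - (pat.length - 1)) := by
  have hm1 : 1 ≤ pat.length := List.length_pos_iff.mpr hm
  set d := t.length - (pat.length - 1) with hd
  have hdrop : (t ++ [x]).drop d = t.drop d ++ [x] :=
    List.drop_append_of_le_length (by omega)
  have hlen : (t.drop d ++ [x]).length = t.length - d + 1 := by
    simp [List.length_drop]
  by_cases hc : pat.length ≤ t.length + 1
  · rw [if_pos (by rw [hlen]; omega)]
    rw [← hdrop, List.drop_drop]
    congr 1
    simp
    omega
  · rw [if_neg (by rw [hlen]; omega)]
    have hd0 : d = 0 := by omega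
    have he : (t ++ [x]).length - (pat.length - 1) = 0 := by
      simp only [List.length_append, List.length_cons, List.length_nil]
      omega
    rw [hd0, he]
    simp

lemma A_fold (pat : List Int) (hm : pat ≠ []) :
    ∀ (rest t acc : List Int),
      (rest.foldl (stepA pat) (t.drop (t.length - (pat.length - 1)), acc)).2
        = acc ++ indAux pat t rest := by
  intro rest
  induction rest with
  | nil => intro t acc; simp [indAux]
  | cons x r ih =>
    intro t acc
    have hstep : stepA pat (t.drop (t.length - (pat.length - 1)), acc) x
        = ((t ++ [x]).drop ((t ++ [x]).length - (pat.length - 1)),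
            acc ++ [if pat <:+ (t ++ [x]) then (1 : Int) else 0]) := by
      rw [stepA]
      refine Prod.ext ?_ ?_
      · exact stateA_eq pat t x hm
      · simp only
        congr 1
        rw [if_congr (window_eq_iff pat t x hm) rfl rfl]
    rw [List.foldl_cons, hstep, ih (t ++ [x]), indAux]
    simp

lemma A_fold_nil :
    ∀ (rest : List Int) (w acc : List Int),
      (rest.foldl (stepA []) (w, acc)).2 = acc ++ List.replicate rest.length 0 := by
  intro rest
  induction rest with
  | nil => intro w acc; simp
  | cons x r ih =>
    intro w acc
    have hstep : stepA [] (w, acc) x = ((w ++ [x]).drop 1, acc ++ [(0 : Int)]) := by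
      rw [stepA]
      simp
    rw [List.foldl_cons, hstep, ih]
    simp [List.replicate_succ]

lemma indAux_short (pat : List Int) :
    ∀ (rest t : List Int), t.length + rest.length < pat.length →
      indAux pat t rest = List.replicate rest.length 0 := by
  intro rest
  induction rest with
  | nil => intro t _; simp [indAux]
  | cons x r ih =>
    intro t h
    rw [indAux]
    simp at h
    have hbit : ¬ (pat <:+ (t ++ [x])) := by
      intro hs
      have := hs.length_le
      simp at this
      omega
    rw [if_neg hbit, ih (t ++ [x]) (by simp; omega)]
    simp [List.replicate_succ]

-- ===== VERDICT (by name: the statement is the Claim_ definition above) =====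
theorem bad_window_spec : Claim_equal_bad_window := by
  intro s pat _
  unfold Spec_bad_window
  by_cases hp : pat = []
  · subst hp
    rw [bad_window, bad_window_alt, A_fold_nil]
    simp
  · have hm1 : 1 ≤ pat.length := List.length_pos_iff.mpr hp
    have hA : bad_window s pat = indAux pat [] s := by
      rw [bad_window]
      have := A_fold pat hp s [] []
      simpa using this
    rw [hA, bad_window_alt]
    by_cases hn : s.length < pat.length
    · rw [if_pos (Or.inr hn)]
      rw [indAux_short pat s [] (by simpa using hn)]
    · rw [if_neg (by omega)]
      have hinv : Jinv pat [] 0 := by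
        refine ⟨by omega, by simp only [List.take_zero]; exact List.nil_suffix, ?_⟩
        intro k hk hks
        rw [List.suffix_nil] at hks
        rw [List.take_eq_nil_iff] at hks
        rcases hks with h | h
        · omega
        · exact absurd h hp
      obtain ⟨_, hfail⟩ := buildFail_spec pat hp
      rw [B_fold pat (buildFail pat).1 hp hfail s [] [] 0 hinv]
      simp
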